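-- pv_equiv track=rewrite | github.com/husnainalix77/HusnainPythonPortfolio | Boggle-AI/boggle_game.py | assignPoints
-- ===== SOURCE A (Python) =====
-- def assignPoints(user_words, opponent_words):
--     """Return score for words not found by opponent, using Boggle rules."""
--     total_points = 0
--     for word in user_words:
--         if word not in opponent_words:
--             if len(word) in [3, 4]:
--                 total_points += 1
--             elif len(word) == 5:
--                 total_points += 2
--             elif len(word) == 6:
--                 total_points += 3
--             elif len(word) == 7:
--                 total_points += 5
--             else:
--                 total_points += 11
--     return total_points
-- ===== SOURCE B (Python) =====
-- def assignPoints(user_words, opponent_words):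
--     """Return score for words not found by opponent, using Boggle rules."""
--     opp = set(opponent_words)
--     hist = {}
--     for word in user_words:
--         if word not in opp:
--             n = len(word)
--             hist[n] = hist.get(n, 0) + 1
--     pts = {3: 1, 4: 1, 5: 2, 6: 3, 7: 5}
--     return sum(count * pts.get(n, 11) for n, count in hist.items())
-- ===== Notes on version B (the rewrite author's own statement) =====
-- stated objective: faster
-- what changed: B replaces the per-word if/elif scoring loop with a set for opponent membership plus a length histogram dict scored in a second pass over (length, count) buckets via a points table.
import Mathlib
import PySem

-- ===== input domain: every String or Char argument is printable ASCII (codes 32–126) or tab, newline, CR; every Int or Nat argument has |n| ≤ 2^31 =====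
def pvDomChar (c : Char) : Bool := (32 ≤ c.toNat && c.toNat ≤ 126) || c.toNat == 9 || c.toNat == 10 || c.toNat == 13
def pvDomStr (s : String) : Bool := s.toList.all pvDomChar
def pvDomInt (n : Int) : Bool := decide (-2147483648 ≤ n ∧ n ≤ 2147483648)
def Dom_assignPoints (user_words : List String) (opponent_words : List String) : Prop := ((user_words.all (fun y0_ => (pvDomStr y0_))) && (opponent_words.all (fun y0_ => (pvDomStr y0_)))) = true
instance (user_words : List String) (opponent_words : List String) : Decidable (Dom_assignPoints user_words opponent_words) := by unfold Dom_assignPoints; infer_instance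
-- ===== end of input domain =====

-- B replaces A's per-word if/elif scoring (with a list-membership inner scan) by a set of
-- opponent words plus a length histogram scored bucket-by-bucket from a points table (faster in a timing run).


-- ===== PORT A =====
def assignPoints (user_words : List String) (opponent_words : List String) : Int :=
  user_words.foldl
    (fun total_points word =>
      if opponent_words.contains word then total_points
      else
        if [(3 : Int), 4].contains (PySem.Str.len word) then total_points + 1
        else if PySem.Str.len word = 5 then total_points + 2
        else if PySem.Str.len word = 6 then total_points + 3
        else if PySem.Str.len word = 7 then total_points + 5
        else total_points + 11)
    0

-- ===== PORT B =====
def assignPointsPts : PySem.Dict Int Int :=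
  PySem.Dict.ofList [(3, 1), (4, 1), (5, 2), (6, 3), (7, 5)]

def assignPoints_alt (user_words : List String) (opponent_words : List String) : Int :=
  let opp := PySem.Set.ofList opponent_words
  let hist : PySem.Dict Int Int :=
    user_words.foldl
      (fun hist word =>
        if opp.contains word then hist
        else hist.insert (PySem.Str.len word) (hist.getD (PySem.Str.len word) 0 + 1))
      PySem.Dict.empty
  (hist.items.map (fun p => p.2 * assignPointsPts.getD p.1 11)).sum

-- ===== PRECONDITION & SPEC =====
def Spec_assignPoints (user_words : List String) (opponent_words : List String) (out : Int) : Prop := out = assignPoints_alt user_words opponent_words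
instance (user_words : List String) (opponent_words : List String) (out : Int) : Decidable (Spec_assignPoints user_words opponent_words out) := by unfold Spec_assignPoints; infer_instance

-- ===== CLAIM (what is proved, stated in full; the proofs are below) =====
def Claim_equal_assignPoints : Prop := ∀ (user_words : List String) (opponent_words : List String), Dom_assignPoints user_words opponent_words → Spec_assignPoints user_words opponent_words (assignPoints user_words opponent_words)

-- ===== LEMMAS AND PROOFS =====

-- Boggle point value of a word length
def pvPt (n : Int) : Int :=
  if n = 3 ∨ n = 4 then 1 else if n = 5 then 2 else if n = 6 then 3 else if n = 7 then 5 else 11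

lemma pvPts_getD (n : Int) : assignPointsPts.getD n 11 = pvPt n := by
  simp only [assignPointsPts, pvPt, PySem.Dict.ofList, PySem.Dict.update,
    List.foldl_cons, List.foldl_nil, PySem.Dict.getD_insert, PySem.Dict.getD_empty]
  split_ifs <;> omega

lemma pvA_fold (ow : List String) (uw : List String) (tp : Int) :
    uw.foldl
      (fun total_points word =>
        if ow.contains word then total_points
        else
          if [(3 : Int), 4].contains (PySem.Str.len word) then total_points + 1
          else if PySem.Str.len word = 5 then total_points + 2
          else if PySem.Str.len word = 6 then total_points + 3
          else if PySem.Str.len word = 7 then total_points + 5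
          else total_points + 11)
      tp
    = tp + (((uw.filter (fun w => !(ow.contains w))).map PySem.Str.len).map pvPt).sum := by
  induction uw generalizing tp with
  | nil => simp
  | cons w ws ih =>
    rw [List.foldl_cons, List.filter_cons]
    by_cases hw : ow.contains w
    · rw [if_pos hw, ih]
      simp only [hw, Bool.not_true, Bool.false_eq_true, if_false]
    · rw [if_neg hw, ih]
      simp only [hw, Bool.not_false, if_true, List.map_cons, List.sum_cons]
      have hc : ([(3 : Int), 4].contains (PySem.Str.len w) = true)
          ↔ (PySem.Str.len w = 3 ∨ PySem.Str.len w = 4) := by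
        simp
      unfold pvPt
      by_cases h34 : PySem.Str.len w = 3 ∨ PySem.Str.len w = 4
      · rw [if_pos (hc.mpr h34), if_pos h34]; ring
      · rw [if_neg (fun h => h34 (hc.mp h)), if_neg h34]
        split_ifs <;> ring

lemma pvB_fold (ow : List String) (uw : List String) (d : PySem.Dict Int Int) :
    uw.foldl
      (fun hist word =>
        if (PySem.Set.ofList ow).contains word then hist
        else hist.insert (PySem.Str.len word) (hist.getD (PySem.Str.len word) 0 + 1))
      d
    = ((uw.filter (fun w => !(ow.contains w))).map PySem.Str.len).foldl
        (fun hist n => hist.insert n (hist.getD n 0 + 1)) d := by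
  induction uw generalizing d with
  | nil => rfl
  | cons w ws ih =>
    rw [List.foldl_cons, List.filter_cons]
    by_cases hw : ow.contains w
    · rw [if_pos (by rw [PySem.Set.contains_iff, PySem.Set.mem_ofList]; simpa using hw), ih]
      simp only [hw, Bool.not_true, Bool.false_eq_true, if_false]
    · rw [if_neg (by rw [PySem.Set.contains_iff, PySem.Set.mem_ofList]; simpa using hw), ih]
      simp only [hw, Bool.not_false, if_true, List.map_cons, List.foldl_cons]

lemma pvSum_counter (L : List Int) (f : Int → Int) :
    ((PySem.Set.ofList L).map (fun k => (L.count k : Int) * f k)).sum = (L.map f).sum := by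
  have hnd : (PySem.Set.ofList L).Nodup := PySem.Set.nodup_ofList L
  have hfin : (PySem.Set.ofList L).toFinset = L.toFinset := by
    ext x; simp [PySem.Set.mem_ofList]
  rw [Finset.sum_list_map_count L f, ← hfin,
    ← List.sum_toFinset (fun k => (L.count k : Int) * f k) hnd]
  refine Finset.sum_congr rfl fun x _ => ?_
  simp

-- ===== VERDICT (by name: the statement is the Claim_ definition above) =====
theorem assignPoints_spec : Claim_equal_assignPoints := by
  intro uw ow _
  unfold Spec_assignPoints assignPoints assignPoints_alt
  dsimp only
  rw [pvA_fold, pvB_fold, PySem.Dict.foldl_insert_getD_add_one_eq_counter,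
    PySem.Dict.items_counter, List.map_map, List.map_map]
  simp only [Function.comp_def, pvPts_getD]
  rw [pvSum_counter ((uw.filter (fun w => !(ow.contains w))).map PySem.Str.len) pvPt,
    List.map_map]
  simp only [Function.comp_def, zero_add]
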